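-- pv_equiv track=rewrite | github.com/sbu-dsl/stonybook | stonybook/preprocessing/hathitrust/header.py | is_consecutive_relaxed
-- ===== SOURCE A (Python) =====
-- def is_consecutive_relaxed(nums):
--     count = 0
--     for i in range(len(nums) - 1):
--         if nums[i + 1] > nums[i] + 2:
--             return False
--         if nums[i + 1] > nums[i] + 1:
--             count += 1
--         if count > 3:
--             return False
--     return True
-- ===== SOURCE B (Python) =====
-- def is_consecutive_relaxed(nums):
--     # Divide-and-conquer over the pair-index interval [i, j):
--     # scan returns (any adjacent gap > 2, number of adjacent gaps > 1)
--     # among the pairs (k, k+1) with i <= k < j, combining halves.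
--     def scan(i, j):
--         if j <= i:
--             return (False, 0)
--         if j == i + 1:
--             d = nums[i + 1] - nums[i]
--             return (d > 2, 1 if d > 1 else 0)
--         mid = (i + j) // 2
--         big1, cnt1 = scan(i, mid)
--         big2, cnt2 = scan(mid, j)
--         return (big1 or big2, cnt1 + cnt2)
--     big, cnt = scan(0, len(nums) - 1)
--     return not big and cnt <= 3
-- ===== Notes on version B (the rewrite author's own statement) =====
-- stated objective: alternative
-- what changed: Replaces A's single left-to-right indexed loop with a running counter and early exits by a recursive divide-and-conquer over the pair-index interval that combines (max-gap-exceeded, gap count) summaries of the two halves and decides the answer once at the top.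
import Mathlib
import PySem

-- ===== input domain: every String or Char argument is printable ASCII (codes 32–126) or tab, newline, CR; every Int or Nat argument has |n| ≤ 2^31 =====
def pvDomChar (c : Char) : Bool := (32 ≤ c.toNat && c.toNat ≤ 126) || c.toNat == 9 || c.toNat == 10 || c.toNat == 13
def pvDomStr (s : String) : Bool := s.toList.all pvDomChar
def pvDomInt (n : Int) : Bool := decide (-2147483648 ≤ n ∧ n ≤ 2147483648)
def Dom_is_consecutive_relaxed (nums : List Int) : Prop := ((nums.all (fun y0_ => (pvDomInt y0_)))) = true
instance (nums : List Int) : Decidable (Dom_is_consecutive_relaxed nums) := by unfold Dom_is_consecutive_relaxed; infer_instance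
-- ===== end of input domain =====

-- B replaces A's single left-to-right loop with a running counter and early exits by a
-- divide-and-conquer over the pair-index interval, combining (gap>2 seen, count of gaps>1)
-- summaries of the two halves. Objective: alternative (same O(n) cost, different algorithm shape).

-- ===== PORT A =====
-- the loop 'for i in range(len(nums)-1)' with running count and two early returns
def pvGoA (nums : List Int) (idxs : List Int) (count : Int) : Bool :=
  match idxs with
  | [] => true
  | i :: rest =>
    match PySem.List.pyGet? nums (i + 1), PySem.List.pyGet? nums i with
    | some nxt, some cur =>
      if nxt > cur + 2 then false
      else
        let count' := if nxt > cur + 1 then count + 1 else count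
        if count' > 3 then false else pvGoA nums rest count'
    | _, _ => false   -- unreachable: range indices are in bounds

def is_consecutive_relaxed (nums : List Int) : Bool :=
  pvGoA nums (PySem.List.pyRange 0 ((nums.length : Int) - 1) 1) 0

-- ===== PORT B =====
-- Source B's scan(i, j): divide-and-conquer over pair indices i ≤ k < j.
-- nums.getD is exact here: Source B only indexes in range.
def pvScan (nums : List Int) (i j : Nat) : Bool × Nat :=
  if _h1 : j ≤ i then (false, 0)
  else if _h2 : j = i + 1 then
    let d := nums.getD (i + 1) 0 - nums.getD i 0
    (decide (d > 2), if d > 1 then 1 else 0)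
  else
    let mid := (i + j) / 2
    let r1 := pvScan nums i mid
    let r2 := pvScan nums mid j
    (r1.1 || r2.1, r1.2 + r2.2)
termination_by j - i
decreasing_by all_goals omega

def is_consecutive_relaxed_alt (nums : List Int) : Bool :=
  let r := pvScan nums 0 (nums.length - 1)
  !r.1 && decide (r.2 ≤ 3)

-- ===== PRECONDITION & SPEC =====
def Spec_is_consecutive_relaxed (nums : List Int) (out : Bool) : Prop := out = is_consecutive_relaxed_alt nums
instance (nums : List Int) (out : Bool) : Decidable (Spec_is_consecutive_relaxed nums out) := by unfold Spec_is_consecutive_relaxed; infer_instance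

-- ===== CLAIM (what is proved, stated in full; the proofs are below) =====
def Claim_equal_is_consecutive_relaxed : Prop := ∀ (nums : List Int), Dom_is_consecutive_relaxed nums → Spec_is_consecutive_relaxed nums (is_consecutive_relaxed nums)

-- ===== LEMMAS AND PROOFS =====

-- A's loop restated as structural recursion on the suffix of the list
def pvGoPairs : List Int → Int → Bool
  | [], _ => true
  | [_], _ => true
  | a :: b :: rest, count =>
    if b > a + 2 then false
    else
      let count' := if b > a + 1 then count + 1 else count
      if count' > 3 then false else pvGoPairs (b :: rest) count'

def pvDiffs (l : List Int) : List Int := (l.zip l.tail).map (fun p => p.2 - p.1)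

theorem pvDiffs_cons (a b : Int) (r : List Int) :
    pvDiffs (a :: b :: r) = (b - a) :: pvDiffs (b :: r) := by
  simp [pvDiffs]

theorem pvDiffs_length (nums : List Int) :
    (pvDiffs nums).length = nums.length - 1 := by
  simp [pvDiffs]

theorem pvDiffs_getElem (nums : List Int) (i : Nat) (h : i < (pvDiffs nums).length) :
    (pvDiffs nums)[i] = nums.getD (i + 1) 0 - nums.getD i 0 := by
  have hlen := pvDiffs_length nums
  have h1 : i < nums.length := by omega
  have h2 : i + 1 < nums.length := by omega
  simp [pvDiffs, List.getD_eq_getElem?_getD, List.getElem?_eq_getElem h1,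
    List.getElem?_eq_getElem h2, List.getElem_tail]

-- bridge: the indexed loop over range(i, len-1) equals the structural loop on drop i
theorem pvGoA_eq_pairs (nums : List Int) (i : Nat) (count : Int) :
    pvGoA nums (PySem.List.pyRange (i : Int) ((nums.length : Int) - 1) 1) count
      = pvGoPairs (nums.drop i) count := by
  by_cases h : i + 1 < nums.length
  · have hlt : (i : Int) < (nums.length : Int) - 1 := by omega
    rw [PySem.List.pyRange_one_cons hlt]
    have h1 : i < nums.length := by omega
    have h2 : i + 1 < nums.length := h
    have hg1 : PySem.List.pyGet? nums ((i : Int) + 1) = some nums[i + 1] := by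
      have : ((i : Int) + 1) = ((i + 1 : Nat) : Int) := by push_cast; ring
      rw [this, PySem.List.pyGet?_natCast]
      simp [List.getElem?_eq_getElem h2]
    have hg0 : PySem.List.pyGet? nums (i : Int) = some nums[i] := by
      rw [PySem.List.pyGet?_natCast]
      simp [List.getElem?_eq_getElem h1]
    have hdrop : nums.drop i = nums[i] :: nums.drop (i + 1) := List.drop_eq_getElem_cons h1
    have hdrop2 : nums.drop (i + 1) = nums[i + 1] :: nums.drop (i + 2) := List.drop_eq_getElem_cons h2
    rw [hdrop, hdrop2]
    show pvGoA nums ((i : Int) :: _) count = _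
    rw [pvGoA, hg1, hg0]
    simp only [pvGoPairs]
    have hrec : ((i : Int) + 1) = ((i + 1 : Nat) : Int) := by push_cast; ring
    by_cases hA : nums[i + 1] > nums[i] + 2
    · simp [hA]
    · by_cases hB : nums[i + 1] > nums[i] + 1
      · by_cases hC : count + 1 > 3
        · simp [hA, hB, hC]
        · simp only [hA, hB, hC, if_false, if_true, if_pos, if_neg, not_false_iff]
          rw [hrec, pvGoA_eq_pairs nums (i + 1) (count + 1), hdrop2]
      · by_cases hC : count > 3
        · simp [hA, hB, hC]
        · simp only [hA, hB, hC, if_false, if_true, if_pos, if_neg, not_false_iff]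
          rw [hrec, pvGoA_eq_pairs nums (i + 1) count, hdrop2]
  · -- range empty, drop has length ≤ 1
    have hempty : PySem.List.pyRange (i : Int) ((nums.length : Int) - 1) 1 = [] := by
      rw [PySem.List.pyRange_one]
      have : ((nums.length : Int) - 1 - (i : Int)).toNat = 0 := by omega
      simp [this]
    rw [hempty]
    have hlen : (nums.drop i).length ≤ 1 := by simp; omega
    match hd : nums.drop i with
    | [] => simp [pvGoA, pvGoPairs]
    | [x] => simp [pvGoA, pvGoPairs]
    | x :: y :: r => rw [hd] at hlen; simp at hlen
termination_by nums.length - i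

-- characterisation of the structural loop by the two aggregates over the difference list
theorem pvGoPairs_eq_agg (l : List Int) (count : Int) (hc : count ≤ 3) :
    pvGoPairs l count
      = (((pvDiffs l).all (fun d => !(d > 2))) &&
          decide (count + (((pvDiffs l).filter (fun d => d > 1)).length : Int) ≤ 3)) := by
  match l with
  | [] => simp [pvGoPairs, pvDiffs]; omega
  | [x] => simp [pvGoPairs, pvDiffs]; omega
  | a :: b :: rest =>
    rw [pvDiffs_cons]
    by_cases hA : b > a + 2
    · have hd : (b - a > 2) := by omega
      simp [pvGoPairs, hA, hd]
    · have hd2 : ¬ (b - a > 2) := by omega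
      by_cases hB : b > a + 1
      · have hd1 : (b - a > 1) := by omega
        by_cases hC : count + 1 > 3
        · simp [pvGoPairs, hA, hB, hC, hd1, hd2, List.filter_cons]
          intro _
          omega
        · have ih := pvGoPairs_eq_agg (b :: rest) (count + 1) (by omega)
          simp only [pvGoPairs, hA, hB, hC, hd1, hd2, if_neg, if_pos, not_false_iff, ih,
            List.all_cons, List.filter_cons, List.length_cons]
          simp only [decide_false, decide_true, Bool.not_false, Bool.true_and, if_true,
            List.length_cons]
          congr 1
          rw [decide_eq_decide]
          push_cast
          omega
      · have hd1 : ¬ (b - a > 1) := by omega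
        have ih := pvGoPairs_eq_agg (b :: rest) count hc
        simp only [pvGoPairs, hA, hB, hd1, hd2, if_neg, if_pos, not_false_iff, ih,
          List.all_cons, List.filter_cons]
        simp only [decide_false, decide_true, Bool.not_false, Bool.true_and, if_false,
          Bool.false_eq_true]
        split
        · simp_all
          intro _
          omega
        · rfl

-- pvScan computes exactly the (any, count) aggregates of the segment [i, j) of the diff list
theorem pvScan_eq_seg (nums : List Int) (i j : Nat) (hj : j ≤ (pvDiffs nums).length) :
    pvScan nums i j
      = ((((pvDiffs nums).drop i).take (j - i)).any (fun d => decide (d > 2)),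
         ((((pvDiffs nums).drop i).take (j - i)).filter (fun d => decide (d > 1))).length) := by
  rw [pvScan]
  by_cases h1 : j ≤ i
  · have : j - i = 0 := by omega
    simp [h1, this]
  · by_cases h2 : j = i + 1
    · subst h2
      have hi : i < (pvDiffs nums).length := by omega
      have hdrop : (pvDiffs nums).drop i = (pvDiffs nums)[i] :: (pvDiffs nums).drop (i + 1) :=
        List.drop_eq_getElem_cons hi
      have htake : i + 1 - i = 1 := by omega
      simp only [h1, dif_neg, dif_pos, not_false_iff, hdrop, htake, List.take_succ_cons,
        List.take_zero, List.any_cons, List.any_nil, List.filter_cons, List.filter_nil,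
        Bool.or_false, pvDiffs_getElem nums i hi]
      refine Prod.ext rfl ?_
      simp only [List.getD_eq_getElem?_getD]
      split <;> rename_i hx <;> simp [hx]
    · have hi2 : i + 2 ≤ j := by omega
      have hmid1 : i < (i + j) / 2 := by omega
      have hmid2 : (i + j) / 2 < j := by omega
      have ih1 := pvScan_eq_seg nums i ((i + j) / 2) (by omega)
      have ih2 := pvScan_eq_seg nums ((i + j) / 2) j hj
      simp only [h1, h2, dif_neg, not_false_iff, ih1, ih2]
      have hseg : ((pvDiffs nums).drop i).take (j - i)
          = ((pvDiffs nums).drop i).take ((i + j) / 2 - i)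
            ++ ((pvDiffs nums).drop ((i + j) / 2)).take (j - (i + j) / 2) := by
        have h3 : j - i = ((i + j) / 2 - i) + (j - (i + j) / 2) := by omega
        rw [h3, List.take_add]
        congr 2
        rw [List.drop_drop]
        congr 1
        omega
      rw [hseg]
      simp [List.any_append, List.filter_append]
termination_by j - i

theorem pvAlt_eq (nums : List Int) :
    is_consecutive_relaxed_alt nums
      = (((pvDiffs nums).all (fun d => !(d > 2))) &&
          decide ((0 : Int) + (((pvDiffs nums).filter (fun d => d > 1)).length : Int) ≤ 3)) := by
  have hlen := pvDiffs_length nums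
  have hj : nums.length - 1 = (pvDiffs nums).length := by omega
  rw [is_consecutive_relaxed_alt]
  rw [show pvScan nums 0 (nums.length - 1) = pvScan nums 0 (pvDiffs nums).length from by rw [hj]]
  rw [pvScan_eq_seg nums 0 (pvDiffs nums).length le_rfl]
  simp only [List.drop_zero, Nat.sub_zero, List.take_length]
  congr 1
  · -- !(any (>2)) = all (!(>2))
    simp [List.all_eq_not_any_not]
  · rw [decide_eq_decide]
    push_cast
    omega

-- ===== VERDICT (by name: the statement is the Claim_ definition above) =====
theorem is_consecutive_relaxed_spec : Claim_equal_is_consecutive_relaxed := by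
  intro nums _
  show is_consecutive_relaxed nums = is_consecutive_relaxed_alt nums
  have h0 := pvGoA_eq_pairs nums 0 0
  simp only [Nat.cast_zero, List.drop_zero] at h0
  rw [is_consecutive_relaxed, h0, pvGoPairs_eq_agg nums 0 (by omega), pvAlt_eq]
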